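-- pv_equiv track=rewrite | github.com/maninbule/teachPythonLeetcode | 09面试题/05-SIG公司 模拟面试题目(算法).py | solve
-- ===== SOURCE A (Python) =====
-- def solve(pos:list[list[int]])->int:
--     n = len(pos)
--     res = 0
--     for i in range(n):
--         a = pos[i]
--         for j in range(i + 1,n):
--             b = pos[j]
--             if abs(a[0] - b[0]) <= 2 and abs(a[1] - b[1]) <= 2:
--                 res += 1
--     return res
-- ===== SOURCE B (Python) =====
-- def solve(pos: list[list[int]]) -> int:
--     # Hash points by (x, y) cell; each close pair is counted once:
--     # pairs inside one cell via c*(c-1)//2, cross-cell pairs via 12 "half" offsets.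
--     cnt = {}
--     for p in pos:
--         k = (p[0], p[1])
--         cnt[k] = cnt.get(k, 0) + 1
--     half = ((0, 1), (0, 2), (1, -2), (1, -1), (1, 0), (1, 1), (1, 2),
--             (2, -2), (2, -1), (2, 0), (2, 1), (2, 2))
--     total = 0
--     for (x, y), c in cnt.items():
--         total += c * (c - 1) // 2
--         for dx, dy in half:
--             total += c * cnt.get((x + dx, y + dy), 0)
--     return total
-- ===== Notes on version B (the rewrite author's own statement) =====
-- stated objective: faster
-- what changed: Replaces the O(n^2) all-pairs scan by a grid hash: count points per (x,y) cell in a dict, then sum within-cell pairs c*(c-1)//2 and cross-cell products over 12 half offsets.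
-- outside the precondition, e.g. on solve([[5]]): A returns 0, B raises IndexError; on solve([[0], [10]]): A returns 0, B raises IndexError
import Mathlib
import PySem

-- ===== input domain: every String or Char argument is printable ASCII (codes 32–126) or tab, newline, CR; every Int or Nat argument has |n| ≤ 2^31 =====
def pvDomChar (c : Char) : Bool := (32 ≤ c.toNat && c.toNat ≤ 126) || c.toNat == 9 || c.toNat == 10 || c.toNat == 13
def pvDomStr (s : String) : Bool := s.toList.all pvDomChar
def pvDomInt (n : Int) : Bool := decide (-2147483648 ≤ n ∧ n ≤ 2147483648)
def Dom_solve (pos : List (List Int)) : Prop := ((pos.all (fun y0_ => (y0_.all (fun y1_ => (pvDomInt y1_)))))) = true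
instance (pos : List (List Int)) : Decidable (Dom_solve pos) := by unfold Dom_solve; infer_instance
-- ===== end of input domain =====

-- B replaces A's O(n^2) all-pairs scan by a dict keyed on the point's (x,y):
-- within-cell pairs via c*(c-1)//2 plus cross-cell products over 12 half offsets (objective: faster).

-- ===== PORT A =====
def solve (pos : List (List Int)) : Int :=
  let n : Int := (pos.length : Int)
  (PySem.List.pyRange 0 n 1).foldl (fun res i =>
    let a := PySem.List.pyGetD pos i []
    (PySem.List.pyRange (i + 1) n 1).foldl (fun res j =>
      let b := PySem.List.pyGetD pos j []
      if |PySem.List.pyGetD a 0 0 - PySem.List.pyGetD b 0 0| ≤ 2 ∧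
         |PySem.List.pyGetD a 1 0 - PySem.List.pyGetD b 1 0| ≤ 2 then res + 1 else res) res) 0

-- ===== PORT B =====
-- k = (p[0], p[1])
def pvKey (p : List Int) : Int × Int := (PySem.List.pyGetD p 0 0, PySem.List.pyGetD p 1 0)

-- the 12 "half" offsets of Source B
def pvHalf : List (Int × Int) :=
  [(0,1),(0,2),(1,-2),(1,-1),(1,0),(1,1),(1,2),(2,-2),(2,-1),(2,0),(2,1),(2,2)]

def solve_alt (pos : List (List Int)) : Int :=
  let cnt := pos.foldl (fun d p =>
      let k := pvKey p
      d.insert k (d.getD k 0 + 1)) PySem.Dict.empty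
  cnt.items.foldl (fun total kc =>
      let total := total + PySem.Int.floordiv (kc.2 * (kc.2 - 1)) 2
      pvHalf.foldl (fun t dd =>
        t + kc.2 * cnt.getD (kc.1.1 + dd.1, kc.1.2 + dd.2) 0) total) 0

-- ===== PRECONDITION & SPEC =====
-- Pre_ excludes inputs containing a point with fewer than 2 coordinates: A raises IndexError on
-- them except when empty inner loops or `and` short-circuit avoid the access (then A returns 0),
-- while B's own hashing always raises IndexError there.
def Pre_solve (pos : List (List Int)) : Prop := ∀ p ∈ pos, 2 ≤ p.length
instance (pos : List (List Int)) : Decidable (Pre_solve pos) := by unfold Pre_solve; infer_instance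
def pvWitness_solve : List (List Int) := [[0,0],[1,2],[5,5]]

def Spec_solve (pos : List (List Int)) (out : Int) : Prop := out = solve_alt pos
instance (pos : List (List Int)) (out : Int) : Decidable (Spec_solve pos out) := by unfold Spec_solve; infer_instance

-- ===== CLAIM (what is proved, stated in full; the proofs are below) =====
def Claim_equal_solve : Prop := ∀ (pos : List (List Int)), Dom_solve pos → Pre_solve pos → Spec_solve pos (solve pos)

-- ===== LEMMAS AND PROOFS =====

-- Bool test "Chebyshev distance ≤ 2" on keys
def closeK (k k' : Int × Int) : Bool := decide (|k.1 - k'.1| ≤ 2 ∧ |k.2 - k'.2| ≤ 2)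

-- reference pair count: for each key, close keys strictly after it
def pcK : List (Int × Int) → Int
  | [] => 0
  | k :: t => (t.countP (closeK k) : Int) + pcK t

-- all 25 offsets
def D25 : List (Int × Int) :=
  [(0,0),
   (0,1),(0,2),(1,-2),(1,-1),(1,0),(1,1),(1,2),(2,-2),(2,-1),(2,0),(2,1),(2,2),
   (0,-1),(0,-2),(-1,2),(-1,1),(-1,0),(-1,-1),(-1,-2),(-2,2),(-2,1),(-2,0),(-2,-1),(-2,-2)]

theorem D25_eq : D25 = (0,0) :: (pvHalf ++ pvHalf.map (fun d => (-d.1, -d.2))) := by decide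

theorem mem_D25 (a b : Int) : ((a, b) ∈ D25) ↔ (|a| ≤ 2 ∧ |b| ≤ 2) := by
  rw [abs_le, abs_le]
  constructor
  · intro h
    simp only [D25, List.mem_cons, Prod.mk.injEq, List.not_mem_nil, or_false] at h
    omega
  · rintro ⟨⟨h1, h2⟩, ⟨h3, h4⟩⟩
    interval_cases a <;> interval_cases b <;> decide

theorem nodup_D25 : D25.Nodup := by decide

theorem closeK_comm (x y : Int × Int) : closeK x y = closeK y x := by
  simp only [closeK, decide_eq_decide, abs_le]; omega

theorem closeK_refl (x : Int × Int) : closeK x x = true := by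
  simp [closeK]

-- Bool test on raw points, as A's inner condition reads it
def closeb (a b : List Int) : Bool := closeK (pvKey a) (pvKey b)

theorem sum_range_countP (pos : List (List Int)) :
    ((List.range pos.length).map
      (fun k => (((pos.drop (k+1)).countP (closeb (pos.getD k []))) : Int))).sum
    = pcK (pos.map pvKey) := by
  induction pos with
  | nil => simp [pcK]
  | cons a t ih =>
    rw [List.length_cons, List.range_succ_eq_map]
    simp only [List.map_cons, List.map_map, List.sum_cons, List.map_cons (f := pvKey)]
    show _ + _ = pcK (pvKey a :: t.map pvKey)
    rw [show pcK (pvKey a :: t.map pvKey)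
        = ((t.map pvKey).countP (closeK (pvKey a)) : Int) + pcK (t.map pvKey) from rfl]
    rw [← ih]
    simp only [Function.comp_def, List.countP_map, Nat.succ_eq_add_one]
    rfl

theorem A_eq_sum (pos : List (List Int)) :
    solve pos = ((List.range pos.length).map
      (fun k => (((pos.drop (k+1)).countP (closeb (pos.getD k []))) : Int))).sum := by
  unfold solve
  rw [PySem.List.foldl_congr_mem _ _
      (fun res i => res + (((pos.drop (i+1).toNat).countP (closeb (PySem.List.pyGetD pos i []))) : Int)) 0 ?_]
  · rw [PySem.List.foldl_add, zero_add, PySem.List.pyRange_one]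
    simp only [List.map_map, Int.sub_zero, Int.toNat_natCast]
    refine congrArg List.sum (List.map_congr_left ?_)
    intro k hk
    have h2 : (((k : Int)) + 1).toNat = k + 1 := by omega
    simp [h2, PySem.List.pyGetD_natCast]
  · intro res i hi
    have h0 : (0 : Int) ≤ i := (PySem.List.mem_pyRange_one.mp hi).1
    have h0' : (0 : Int) ≤ i + 1 := by omega
    show (PySem.List.pyRange (i + 1) ((pos.length : Int))).foldl
        (fun res j =>
          if |PySem.List.pyGetD (PySem.List.pyGetD pos i []) 0 0 - PySem.List.pyGetD (PySem.List.pyGetD pos j []) 0 0| ≤ 2 ∧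
             |PySem.List.pyGetD (PySem.List.pyGetD pos i []) 1 0 - PySem.List.pyGetD (PySem.List.pyGetD pos j []) 1 0| ≤ 2
           then res + 1 else res) res = _
    rw [PySem.List.foldl_pyRange_pyGetD' pos []
        (fun res b => if |PySem.List.pyGetD (PySem.List.pyGetD pos i []) 0 0 - PySem.List.pyGetD b 0 0| ≤ 2 ∧
            |PySem.List.pyGetD (PySem.List.pyGetD pos i []) 1 0 - PySem.List.pyGetD b 1 0| ≤ 2
          then res + 1 else res) res h0']
    rw [PySem.List.foldl_ite_add_one]
    rfl

theorem A_eq_pcK (pos : List (List Int)) : solve pos = pcK (pos.map pvKey) := by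
  rw [A_eq_sum, sum_range_countP]

theorem count_inst (m : Int × Int) (K : List (Int × Int)) :
    @List.count _ instBEqOfDecidableEq m K = List.count m K := by
  induction K with
  | nil => rfl
  | cons x K ih =>
    rw [@List.count_cons _ instBEqOfDecidableEq, List.count_cons, ih]
    congr 1
    by_cases h : x = m <;> simp [h]

theorem sum_group (K : List (Int × Int)) (f : Int × Int → Int) :
    (K.map f).sum = ((PySem.Set.ofList K).map (fun k => (K.count k : Int) * f k)).sum := by
  rw [Finset.sum_list_map_count, ← List.sum_toFinset _ (PySem.Set.nodup_ofList K)]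
  have hset : (PySem.Set.ofList K).toFinset = K.toFinset := by
    ext x; simp [List.mem_toFinset, PySem.Set.mem_ofList]
  rw [hset]
  refine Finset.sum_congr rfl ?_
  intro m _
  rw [nsmul_eq_mul, count_inst]

theorem count_as_sum (c : Int × Int) (L : List (Int × Int)) :
    ((L.count c : Nat) : Int) = (L.map (fun x => if x = c then (1:Int) else 0)).sum := by
  rw [List.count_eq_countP, ← PySem.List.sum_map_ite_one_zero (fun x => x == c) L]
  refine congrArg List.sum (List.map_congr_left ?_)
  intro x _
  simp [beq_iff_eq]

theorem sum_ind (x : Int × Int) (S : List (Int × Int)) (h : S.Nodup) :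
    (S.map (fun s => if x = s then (1:Int) else 0)).sum = if x ∈ S then 1 else 0 := by
  induction S with
  | nil => simp
  | cons s S ih =>
    rcases List.nodup_cons.mp h with ⟨hs, hnd⟩
    simp only [List.map_cons, List.sum_cons, List.mem_cons]
    rw [ih hnd]
    by_cases hx : x = s
    · subst hx; simp [hs]
    · simp [hx]

theorem countP_memS (S : List (Int × Int)) (h : S.Nodup) (L : List (Int × Int)) :
    ((L.countP (fun y => decide (y ∈ S))) : Int) = (S.map (fun s => (L.count s : Int))).sum := by
  induction L with
  | nil =>
    simp only [List.countP_nil, List.count_nil, Nat.cast_zero]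
    rw [PySem.List.sum_map_const_int]
    ring
  | cons x L ih =>
    rw [List.countP_cons]
    have hpt : ∀ s ∈ S, (((x :: L).count s : Nat) : Int)
        = (L.count s : Int) + (if x = s then (1:Int) else 0) := by
      intro s _
      rw [List.count_cons]
      by_cases h' : x = s <;> simp [h']
    rw [List.map_congr_left hpt, PySem.List.sum_map_add_int, ← ih, sum_ind x S h]
    by_cases hb : x ∈ S <;> simp [hb]

theorem countP_close (k : Int × Int) (K : List (Int × Int)) :
    ((K.countP (closeK k)) : Int)
    = (D25.map (fun d => (K.count (k.1 + d.1, k.2 + d.2) : Int))).sum := by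
  have hinj : Function.Injective (fun d : Int × Int => (k.1 + d.1, k.2 + d.2)) := by
    intro d1 d2 hEq
    obtain ⟨a, b⟩ := d1; obtain ⟨c, e⟩ := d2
    simp only [Prod.mk.injEq] at hEq ⊢
    omega
  have hS : (D25.map (fun d => (k.1 + d.1, k.2 + d.2))).Nodup := List.Nodup.map hinj nodup_D25
  have hP : ∀ y ∈ K, (closeK k y = true) ↔
      ((fun y => decide (y ∈ D25.map (fun d => (k.1 + d.1, k.2 + d.2)))) y = true) := by
    intro y _
    simp only [closeK, decide_eq_true_eq]
    constructor
    · intro hcl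
      rw [abs_le, abs_le] at hcl
      refine List.mem_map.mpr ⟨(y.1 - k.1, y.2 - k.2),
        (mem_D25 _ _).mpr ⟨abs_le.mpr ⟨by omega, by omega⟩, abs_le.mpr ⟨by omega, by omega⟩⟩, ?_⟩
      obtain ⟨y1, y2⟩ := y
      simp only [Prod.mk.injEq]
      omega
    · intro hm
      rcases List.mem_map.mp hm with ⟨d, hd, rfl⟩
      have hb := (mem_D25 d.1 d.2).mp (by simpa using hd)
      obtain ⟨hb1, hb2⟩ := hb
      rw [abs_le] at hb1 hb2
      refine ⟨?_, ?_⟩ <;> · rw [abs_le]; simp; omega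
  rw [List.countP_congr hP, countP_memS _ hS K, List.map_map]
  rfl

theorem sum_comm_list {A B : Type} (K : List A) (L : List B) (F : A → B → Int) :
    (K.map (fun k => (L.map (F k)).sum)).sum
    = (L.map (fun l => (K.map (fun k => F k l)).sum)).sum := by
  induction K with
  | nil =>
    simp only [List.map_nil, List.sum_nil]
    rw [PySem.List.sum_map_const_int]; ring
  | cons a K ih =>
    simp only [List.map_cons, List.sum_cons, ih]
    rw [← PySem.List.sum_map_add_int]

theorem shift_sym (d : Int × Int) (K : List (Int × Int)) :
    (K.map (fun k => (K.count (k.1 + d.1, k.2 + d.2) : Int))).sum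
    = (K.map (fun k => (K.count (k.1 - d.1, k.2 - d.2) : Int))).sum := by
  calc (K.map (fun k => (K.count (k.1 + d.1, k.2 + d.2) : Int))).sum
      = (K.map (fun k => (K.map (fun x => if x = (k.1 + d.1, k.2 + d.2) then (1:Int) else 0)).sum)).sum := by
        exact congrArg List.sum (List.map_congr_left (fun k _ => count_as_sum _ _))
    _ = (K.map (fun x => (K.map (fun k => if x = (k.1 + d.1, k.2 + d.2) then (1:Int) else 0)).sum)).sum :=
        sum_comm_list K K _
    _ = (K.map (fun x => (K.map (fun k => if k = (x.1 - d.1, x.2 - d.2) then (1:Int) else 0)).sum)).sum := by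
        refine congrArg List.sum (List.map_congr_left ?_)
        intro x _
        refine congrArg List.sum (List.map_congr_left ?_)
        intro k _
        have hiff : (x = (k.1 + d.1, k.2 + d.2)) ↔ (k = (x.1 - d.1, x.2 - d.2)) := by
          obtain ⟨x1, x2⟩ := x; obtain ⟨k1, k2⟩ := k
          simp only [Prod.mk.injEq]
          omega
        simp only [hiff]
    _ = (K.map (fun x => (K.count (x.1 - d.1, x.2 - d.2) : Int))).sum := by
        refine congrArg List.sum (List.map_congr_left ?_)
        intro x _
        exact (count_as_sum _ _).symm

theorem T1 (K : List (Int × Int)) :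
    (K.map (fun k => (K.countP (closeK k) : Int))).sum = 2 * pcK K + K.length := by
  induction K with
  | nil => simp [pcK]
  | cons k t ih =>
    simp only [List.map_cons, List.sum_cons, pcK, List.countP_cons, closeK_refl,
      if_true, List.length_cons]
    have hpt : ∀ k' ∈ t, ((t.countP (closeK k') + if closeK k' k then 1 else 0 : Nat) : Int)
        = ((t.countP (closeK k') : Nat) : Int) + (if closeK k k' then (1:Int) else 0) := by
      intro k' _
      rw [closeK_comm k k']
      by_cases hb : closeK k' k = true <;> simp [hb]
    rw [List.map_congr_left hpt, PySem.List.sum_map_add_int,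
      PySem.List.sum_map_ite_one_zero (fun k' => closeK k k') t, ih]
    push_cast
    ring

theorem two_fdiv (c : Int) : 2 * PySem.Int.floordiv (c * (c - 1)) 2 = c * (c - 1) := by
  have hdvd : (2 : Int) ∣ c * (c - 1) := by
    have h := Int.even_mul_succ_self (c - 1)
    have h2 : Even (c * (c - 1)) := by
      have : (c - 1) * (c - 1 + 1) = c * (c - 1) := by ring
      rwa [this] at h
    exact h2.two_dvd
  exact Int.mul_fdiv_cancel' hdvd

theorem key_identity (K : List (Int × Int)) :
    ((PySem.Set.ofList K).map (fun k =>
        PySem.Int.floordiv ((K.count k : Int) * ((K.count k : Int) - 1)) 2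
        + (pvHalf.map (fun d => (K.count k : Int) * (K.count (k.1 + d.1, k.2 + d.2) : Int))).sum)).sum
    = pcK K := by
  have hT1 := T1 K
  -- split the 25 offsets
  have hsplit : ∀ k : Int × Int, ((K.countP (closeK k)) : Int)
      = (K.count k : Int)
        + ((pvHalf.map (fun d => (K.count (k.1 + d.1, k.2 + d.2) : Int))).sum
           + (pvHalf.map (fun d => (K.count (k.1 - d.1, k.2 - d.2) : Int))).sum) := by
    intro k
    rw [countP_close, D25_eq]
    simp only [List.map_cons, List.map_append, List.map_map, List.sum_cons, List.sum_append,
      add_zero, Function.comp_def]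
    have : (pvHalf.map (fun d : Int × Int => (K.count (k.1 + -d.1, k.2 + -d.2) : Int)))
         = (pvHalf.map (fun d : Int × Int => (K.count (k.1 - d.1, k.2 - d.2) : Int))) := by
      refine List.map_congr_left ?_
      intro d _
      have h1 : k.1 + -d.1 = k.1 - d.1 := by ring
      have h2 : k.2 + -d.2 = k.2 - d.2 := by ring
      rw [h1, h2]
    rw [this]
  have h2 : (K.map (fun k => (K.countP (closeK k) : Int))).sum
      = (K.map (fun k => (K.count k : Int))).sum
        + ((K.map (fun k => (pvHalf.map (fun d => (K.count (k.1 + d.1, k.2 + d.2) : Int))).sum)).sum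
           + (K.map (fun k => (pvHalf.map (fun d => (K.count (k.1 - d.1, k.2 - d.2) : Int))).sum)).sum) := by
    rw [List.map_congr_left (fun k _ => hsplit k), PySem.List.sum_map_add_int,
      PySem.List.sum_map_add_int]
  have h3 : (K.map (fun k => (pvHalf.map (fun d => (K.count (k.1 - d.1, k.2 - d.2) : Int))).sum)).sum
      = (K.map (fun k => (pvHalf.map (fun d => (K.count (k.1 + d.1, k.2 + d.2) : Int))).sum)).sum := by
    rw [sum_comm_list K pvHalf (fun k d => (K.count (k.1 - d.1, k.2 - d.2) : Int)),
        sum_comm_list K pvHalf (fun k d => (K.count (k.1 + d.1, k.2 + d.2) : Int))]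
    refine congrArg List.sum (List.map_congr_left ?_)
    intro d _
    exact (shift_sym d K).symm
  have h4 := sum_group K (fun k => (K.count k : Int))
  have h5 := sum_group K (fun k => (pvHalf.map (fun d => (K.count (k.1 + d.1, k.2 + d.2) : Int))).sum)
  have h6 : ((PySem.Set.ofList K).map (fun k => (K.count k : Int) * 1)).sum = (K.length : Int) := by
    rw [← sum_group K (fun _ => (1:Int)), PySem.List.sum_map_const_int]; ring
  have h6' : ((PySem.Set.ofList K).map (fun k => (K.count k : Int))).sum = (K.length : Int) := by
    rw [← h6]
    refine congrArg List.sum (List.map_congr_left ?_)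
    intro k _; ring
  -- double the goal's left-hand side
  have hdouble : 2 * ((PySem.Set.ofList K).map (fun k =>
        PySem.Int.floordiv ((K.count k : Int) * ((K.count k : Int) - 1)) 2
        + (pvHalf.map (fun d => (K.count k : Int) * (K.count (k.1 + d.1, k.2 + d.2) : Int))).sum)).sum
      = ((PySem.Set.ofList K).map (fun k => (K.count k : Int) * (K.count k : Int))).sum
        + (2 * ((PySem.Set.ofList K).map (fun k => (K.count k : Int) *
            (pvHalf.map (fun d => (K.count (k.1 + d.1, k.2 + d.2) : Int))).sum)).sum
           - ((PySem.Set.ofList K).map (fun k => (K.count k : Int))).sum) := by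
    rw [← List.sum_map_mul_left]
    have hpt : ∀ k ∈ PySem.Set.ofList K,
        2 * (PySem.Int.floordiv ((K.count k : Int) * ((K.count k : Int) - 1)) 2
          + (pvHalf.map (fun d => (K.count k : Int) * (K.count (k.1 + d.1, k.2 + d.2) : Int))).sum)
        = ((K.count k : Int) * (K.count k : Int))
          + (2 * ((K.count k : Int) * (pvHalf.map (fun d => (K.count (k.1 + d.1, k.2 + d.2) : Int))).sum)
             + (-1) * (K.count k : Int)) := by
      intro k _
      rw [mul_add, two_fdiv, List.sum_map_mul_left]
      ring
    rw [List.map_congr_left hpt, PySem.List.sum_map_add_int, PySem.List.sum_map_add_int]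
    rw [List.sum_map_mul_left (PySem.Set.ofList K)
      (fun k => (K.count k : Int) * (pvHalf.map (fun d => (K.count (k.1 + d.1, k.2 + d.2) : Int))).sum) 2]
    rw [List.sum_map_mul_left (PySem.Set.ofList K) (fun k => (K.count k : Int)) (-1)]
    ring
  rw [h2, h3] at hT1
  rw [h4] at hT1
  rw [h5] at hT1
  linarith [hdouble, hT1, h6']

theorem B_eq_pcK (pos : List (List Int)) : solve_alt pos = pcK (pos.map pvKey) := by
  unfold solve_alt
  rw [show pos.foldl (fun d p =>
        let k := pvKey p
        d.insert k (d.getD k 0 + 1)) PySem.Dict.empty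
      = PySem.Dict.counter (pos.map pvKey) from by
    rw [← PySem.Dict.foldl_insert_getD_add_one_eq_counter (pos.map pvKey), List.foldl_map]]
  simp only [PySem.List.foldl_add]
  rw [PySem.List.foldl_congr_mem _ _
    (fun total kc => total + (PySem.Int.floordiv (kc.2 * (kc.2 - 1)) 2
      + (pvHalf.map (fun dd => kc.2 *
          (PySem.Dict.counter (pos.map pvKey)).getD (kc.1.1 + dd.1, kc.1.2 + dd.2) 0)).sum)) 0
    (by intro acc x _; ring)]
  rw [PySem.List.foldl_add, zero_add, PySem.Dict.items_counter, List.map_map]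
  rw [← key_identity (pos.map pvKey)]
  refine congrArg List.sum (List.map_congr_left ?_)
  intro k _
  simp only [Function.comp_def, PySem.Dict.getD_counter]

-- ===== VERDICT (by name: the statement is the Claim_ definition above) =====
theorem solve_spec : Claim_equal_solve := by
  intro pos _ _
  unfold Spec_solve
  rw [A_eq_pcK, B_eq_pcK]
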